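-- pv_equiv track=rewrite | github.com/landron/Problems | Canon/sequences.py | combinations_1_get_prev
-- ===== SOURCE A (Python) =====
-- def combinations_1_get_prev(seq, seq_len, limit):
--     '''
--         generate the previous element when advancing is no more possible
--     '''
--
--     if seq_len <= 1:
--         return (seq_len, False)
--     seq_len -= 1
--
--     next_val = seq[seq_len-1] + 1
--     if next_val == limit:
--         return combinations_1_get_prev(seq, seq_len, limit)
--     else:
--         seq[seq_len-1] = next_val
--         return (seq_len, True)
-- ===== SOURCE B (Python) =====
-- def combinations_1_get_prev(seq, seq_len, limit):
--     '''
--         generate the previous element when advancing is no more possible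
--     '''
--     if seq_len <= 1:
--         return (seq_len, False)
--     for j in range(seq_len - 2, -1, -1):
--         if seq[j] + 1 != limit:
--             seq[j] += 1
--             return (j + 1, True)
--     return (1, False)
-- ===== Notes on version B (the rewrite author's own statement) =====
-- stated objective: simpler
-- what changed: Replaces the tail recursion on a decremented seq_len by a single downward range scan that finds the rightmost non-saturated index and returns directly.
import Mathlib
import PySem

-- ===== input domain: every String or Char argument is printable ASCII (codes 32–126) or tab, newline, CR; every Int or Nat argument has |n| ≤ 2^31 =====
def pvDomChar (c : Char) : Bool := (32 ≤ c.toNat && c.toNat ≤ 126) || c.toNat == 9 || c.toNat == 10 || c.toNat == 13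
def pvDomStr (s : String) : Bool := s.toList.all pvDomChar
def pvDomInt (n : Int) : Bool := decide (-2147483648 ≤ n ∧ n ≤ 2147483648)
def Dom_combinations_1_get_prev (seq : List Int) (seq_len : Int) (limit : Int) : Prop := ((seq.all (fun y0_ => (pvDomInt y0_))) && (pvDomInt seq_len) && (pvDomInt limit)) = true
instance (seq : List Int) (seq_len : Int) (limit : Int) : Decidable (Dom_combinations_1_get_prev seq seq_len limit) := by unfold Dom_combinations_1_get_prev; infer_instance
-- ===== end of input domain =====

-- B replaces A's tail recursion by a single downward range scan (simpler decomposition).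
-- Both Pythons mutate seq identically (the found element is incremented); the equivalence
-- proved here is about the RETURN value only.

-- ===== PORT A =====
-- A's tail recursion on the decremented seq_len; on an out-of-range access
-- (IndexError, excluded by Pre_) the port returns (0, false).
def combinations_1_get_prev (seq : List Int) (seq_len : Int) (limit : Int) : Int × Bool :=
  if seq_len ≤ 1 then (seq_len, false)
  else
    match PySem.List.pyGet? seq (seq_len - 1 - 1) with
    | none => (0, false)
    | some v =>
      if v + 1 = limit then combinations_1_get_prev seq (seq_len - 1) limit
      else (seq_len - 1, true)
termination_by seq_len.toNat
decreasing_by omega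

-- ===== PORT B =====
-- B's downward scan over range(seq_len-2, -1, -1) with early return.
def pvAltLoop (seq : List Int) (limit : Int) : List Int → Int × Bool
  | [] => (1, false)
  | j :: rest =>
    match PySem.List.pyGet? seq j with
    | none => (0, false)
    | some v =>
      if v + 1 ≠ limit then (j + 1, true)
      else pvAltLoop seq limit rest

def combinations_1_get_prev_alt (seq : List Int) (seq_len : Int) (limit : Int) : Int × Bool :=
  if seq_len ≤ 1 then (seq_len, false)
  else pvAltLoop seq limit (PySem.List.pyRange (seq_len - 2) (-1) (-1))

-- ===== PRECONDITION & SPEC =====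
-- Pre_ excludes exactly the inputs where Python A raises IndexError
-- (seq_len ≥ 2 with first accessed index seq_len-2 out of range); B raises there too.
def Pre_combinations_1_get_prev (seq : List Int) (seq_len : Int) (limit : Int) : Prop :=
  seq_len ≤ 1 ∨ seq_len - 1 ≤ (seq.length : Int)
instance (seq : List Int) (seq_len : Int) (limit : Int) : Decidable (Pre_combinations_1_get_prev seq seq_len limit) := by unfold Pre_combinations_1_get_prev; infer_instance

def pvWitness_combinations_1_get_prev : List Int × Int × Int := ([1, 2, 3], 3, 4)

def Spec_combinations_1_get_prev (seq : List Int) (seq_len : Int) (limit : Int) (out : Int × Bool) : Prop := out = combinations_1_get_prev_alt seq seq_len limit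
instance (seq : List Int) (seq_len : Int) (limit : Int) (out : Int × Bool) : Decidable (Spec_combinations_1_get_prev seq seq_len limit out) := by unfold Spec_combinations_1_get_prev; infer_instance

-- ===== CLAIM (what is proved, stated in full; the proofs are below) =====
def Claim_equal_combinations_1_get_prev : Prop := ∀ (seq : List Int) (seq_len : Int) (limit : Int), Dom_combinations_1_get_prev seq seq_len limit → Pre_combinations_1_get_prev seq seq_len limit → Spec_combinations_1_get_prev seq seq_len limit (combinations_1_get_prev seq seq_len limit)

-- ===== LEMMAS AND PROOFS =====

theorem pv_get (seq : List Int) (i : Int) (h0 : 0 ≤ i) (hlt : i.toNat < seq.length) :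
    PySem.List.pyGet? seq i = some (seq[i.toNat]'hlt) := by
  simp only [PySem.List.pyGet?, PySem.List.pyIdx?]
  rw [if_pos h0, if_pos (by omega : i < (seq.length : Int))]
  simp [List.getElem?_eq_getElem hlt]

-- A's recursion equals B's scan of the countdown list, for 2 ≤ seq_len ≤ len+1.
theorem pv_main (seq : List Int) (limit : Int) (seq_len : Int)
    (h2 : 2 ≤ seq_len) (hlen : seq_len - 1 ≤ (seq.length : Int)) :
    combinations_1_get_prev seq seq_len limit
      = pvAltLoop seq limit (PySem.List.pyRange (seq_len - 2) (-1) (-1)) := by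
  generalize hk : seq_len.toNat = k
  induction k generalizing seq_len with
  | zero => omega
  | succ k ih =>
    have hlt : (seq_len - 2).toNat < seq.length := by omega
    have hget : PySem.List.pyGet? seq (seq_len - 2) = some (seq[(seq_len - 2).toNat]'hlt) :=
      pv_get seq (seq_len - 2) (by omega) hlt
    have hidx : seq_len - 1 - 1 = seq_len - 2 := by omega
    rw [combinations_1_get_prev, if_neg (by omega : ¬ seq_len ≤ 1), hidx, hget]
    rw [PySem.List.pyRange_neg_one_cons (by omega : (-1 : Int) < seq_len - 2), pvAltLoop, hget]
    dsimp only
    by_cases hv : seq[(seq_len - 2).toNat]'hlt + 1 = limit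
    · rw [if_pos hv, if_neg (by simp [hv])]
      by_cases h1 : seq_len ≤ 2
      · have hsl : seq_len = 2 := by omega
        subst hsl
        rw [combinations_1_get_prev, if_pos (by norm_num)]
        rw [show (2 : Int) - 2 - 1 = -1 by norm_num]
        rw [PySem.List.pyRange_neg_one_eq_nil (by norm_num), pvAltLoop]
        norm_num
      · rw [ih (seq_len - 1) (by omega) (by omega) (by omega)]
        rw [show seq_len - 1 - 2 = seq_len - 2 - 1 by ring]
    · rw [if_neg hv, if_pos (by simp [hv])]
      simp only [Prod.mk.injEq]
      exact ⟨by omega, trivial⟩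

-- ===== VERDICT (by name: the statement is the Claim_ definition above) =====
theorem combinations_1_get_prev_spec : Claim_equal_combinations_1_get_prev := by
  intro seq seq_len limit _ hpre
  unfold Spec_combinations_1_get_prev combinations_1_get_prev_alt
  by_cases h1 : seq_len ≤ 1
  · rw [combinations_1_get_prev]
    simp [h1]
  · rw [if_neg h1]
    exact pv_main seq limit seq_len (by omega) (by
      rcases hpre with h | h
      · omega
      · exact h)
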